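-- pv_equiv track=rewrite | github.com/P1X3R/alpha-minus-one | decode_move.py | _encode_knight_moves
-- ===== SOURCE A (Python) =====
-- def _encode_knight_moves(rank_offset: int, file_offset: int) -> int | None:
--     """
--     Encodes the relative rank and file offsets of a knight move into its
--     corresponding integer layer (56-63).
--
--     Args:
--         rank_offset (int): The difference in rank between the destination and starting square.
--         file_offset (int): The difference in file between the destination and starting square.
--
--     Returns:
--         int | None: The integer layer for the knight move, or None if the offsets
--                     do not correspond to a valid knight move.
--     """
--     L_SHAPES = [
--         (+2, +1),
--         (+2, -1),
--         (-2, +1),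
--         (-2, -1),
--         (+1, +2),
--         (+1, -2),
--         (-1, +2),
--         (-1, -2),
--     ]
--
--     for i, (l_rank, l_file) in enumerate(L_SHAPES):
--         if rank_offset == l_rank and file_offset == l_file:
--             return 56 + i
--     return None # Should not happen if `encode_move_layer` is called with a valid knight move
-- ===== SOURCE B (Python) =====
-- def _encode_knight_moves(rank_offset: int, file_offset: int) -> int | None:
--     """Closed-form encoder: classify by absolute offsets, then add sign bits."""
--     if abs(rank_offset) == 2 and abs(file_offset) == 1:
--         base = 0
--     elif abs(rank_offset) == 1 and abs(file_offset) == 2: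
--         base = 4
--     else:
--         return None
--     return 56 + base + (2 if rank_offset < 0 else 0) + (1 if file_offset < 0 else 0)
-- ===== Notes on version B (the rewrite author's own statement) =====
-- stated objective: simpler
-- what changed: Replaced the 8-entry L_SHAPES table and enumerate loop with a closed-form classification by absolute offsets plus sign-bit arithmetic.
import Mathlib
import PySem

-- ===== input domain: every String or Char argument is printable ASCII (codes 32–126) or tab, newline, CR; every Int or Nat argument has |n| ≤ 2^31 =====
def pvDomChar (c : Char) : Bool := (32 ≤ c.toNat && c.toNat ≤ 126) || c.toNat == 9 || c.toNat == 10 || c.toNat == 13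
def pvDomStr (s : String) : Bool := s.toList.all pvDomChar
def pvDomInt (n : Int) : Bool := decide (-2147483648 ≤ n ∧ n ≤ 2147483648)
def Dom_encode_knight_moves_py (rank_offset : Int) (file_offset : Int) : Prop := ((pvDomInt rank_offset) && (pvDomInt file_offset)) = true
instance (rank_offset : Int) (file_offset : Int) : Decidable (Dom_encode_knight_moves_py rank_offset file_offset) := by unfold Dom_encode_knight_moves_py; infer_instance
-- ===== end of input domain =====

-- B replaces A's 8-entry L_SHAPES table scan with a closed-form classification by
-- absolute offsets plus sign-bit arithmetic (objective: simpler).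


-- ===== PORT A =====
def pvLShapes : List (Int × Int) :=
  [(2, 1), (2, -1), (-2, 1), (-2, -1), (1, 2), (1, -2), (-1, 2), (-1, -2)]

-- the `for i, (l_rank, l_file) in enumerate(L_SHAPES)` loop with early return
def pvKnightLoop (rank_offset file_offset : Int) : List (Int × Int) → Int → Option Int
  | [], _ => none
  | (l_rank, l_file) :: rest, i =>
      if rank_offset = l_rank ∧ file_offset = l_file then some (56 + i)
      else pvKnightLoop rank_offset file_offset rest (i + 1)

def encode_knight_moves_py (rank_offset : Int) (file_offset : Int) : Option Int :=
  pvKnightLoop rank_offset file_offset pvLShapes 0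

-- ===== PORT B =====
def encode_knight_moves_py_alt (rank_offset : Int) (file_offset : Int) : Option Int :=
  if rank_offset.natAbs = 2 ∧ file_offset.natAbs = 1 then
    some (56 + 0 + (if rank_offset < 0 then 2 else 0) + (if file_offset < 0 then 1 else 0))
  else if rank_offset.natAbs = 1 ∧ file_offset.natAbs = 2 then
    some (56 + 4 + (if rank_offset < 0 then 2 else 0) + (if file_offset < 0 then 1 else 0))
  else none

-- ===== PRECONDITION & SPEC =====
def Spec_encode_knight_moves_py (rank_offset : Int) (file_offset : Int) (out : Option Int) : Prop := out = encode_knight_moves_py_alt rank_offset file_offset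
instance (rank_offset : Int) (file_offset : Int) (out : Option Int) : Decidable (Spec_encode_knight_moves_py rank_offset file_offset out) := by unfold Spec_encode_knight_moves_py; infer_instance

-- ===== CLAIM (what is proved, stated in full; the proofs are below) =====
def Claim_equal_encode_knight_moves_py : Prop := ∀ (rank_offset : Int) (file_offset : Int), Dom_encode_knight_moves_py rank_offset file_offset → Spec_encode_knight_moves_py rank_offset file_offset (encode_knight_moves_py rank_offset file_offset)

-- ===== LEMMAS AND PROOFS =====

-- ===== VERDICT (by name: the statement is the Claim_ definition above) =====
theorem encode_knight_moves_py_spec : Claim_equal_encode_knight_moves_py := by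
  intro r f _
  unfold Spec_encode_knight_moves_py encode_knight_moves_py encode_knight_moves_py_alt
  simp only [pvKnightLoop, pvLShapes]
  split_ifs <;> simp_all <;> omega
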